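-- pv_equiv track=rewrite | github.com/amol93/PythonPractice | Largs_num_from_list_div_by_gcd_30.py | rec
-- ===== SOURCE A (Python) =====
-- def rec(a):
--   if len(a)==0:
--     return
--   elif len(a)==1:
--     return a
--   else:
--     p=[]
--     for i in range(len(a)):
--       x=a[i]
--       xs = a[:i]+a[i+1:]
--       for j in rec(xs):
--         p.append(x+j)
--
--   return p
-- ===== SOURCE B (Python) =====
-- def rec(a):
--     if not a:
--         return None
--     # level-by-level expansion of (prefix, remaining) states instead of recursion
--     states = [("", list(a))]
--     while states[0][1]:
--         states = [(pre + rem[i], rem[:i] + rem[i + 1:])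
--                   for (pre, rem) in states
--                   for i in range(len(rem))]
--     return [pre for (pre, _) in states]
-- ===== Notes on version B (the rewrite author's own statement) =====
-- stated objective: alternative
-- what changed: Replaces A's recursion on sublists with an iterative breadth-first loop that expands a worklist of (prefix, remaining-elements) states level by level until all elements are consumed.
import Mathlib
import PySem

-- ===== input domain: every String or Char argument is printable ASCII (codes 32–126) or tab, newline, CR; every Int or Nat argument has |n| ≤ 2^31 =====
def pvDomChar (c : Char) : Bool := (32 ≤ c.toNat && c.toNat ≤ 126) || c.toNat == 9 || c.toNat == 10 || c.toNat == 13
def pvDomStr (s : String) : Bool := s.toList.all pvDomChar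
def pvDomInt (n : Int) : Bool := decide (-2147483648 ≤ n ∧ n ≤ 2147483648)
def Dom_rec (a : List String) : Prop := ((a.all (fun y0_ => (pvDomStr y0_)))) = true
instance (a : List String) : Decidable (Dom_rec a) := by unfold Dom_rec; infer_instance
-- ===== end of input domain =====

-- B replaces A's recursive permutation builder by an iterative level-by-level
-- expansion of (prefix, remaining) states; objective: alternative (same order of growth).

-- ===== PORT A =====
-- Literal port of A: recursion on the list, inner loop 'for j in rec(xs): p.append(x+j)'
-- as a foldl appending; a[i] with 0 ≤ i < len(a) is List.getD i "".
def rec (a : List String) : Option (List String) :=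
  if a.length = 0 then none
  else if a.length = 1 then some a
  else some ((List.range a.length).attach.foldl
      (fun p i =>
        p ++ ((rec (a.take i.1 ++ a.drop (i.1 + 1))).getD []).map
          (fun j => (a.getD i.1 "") ++ j)) ([] : List String))
termination_by a.length
decreasing_by
  have hi : i.1 < a.length := by
    have := i.2; simpa [List.mem_range] using this
  simp only [List.length_append, List.length_take, List.length_drop]
  omega

-- ===== PORT B =====
-- one expansion of every state, in order: (pre + rem[i], rem without index i)
def altStep (states : List (String × List String)) : List (String × List String) :=
  states.flatMap (fun s => (List.range s.2.length).map
    (fun i => (s.1 ++ s.2.getD i "", s.2.take i ++ s.2.drop (i + 1))))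

-- the while loop; fuel = a.length bounds the iteration count exactly
def altLoop : Nat → List (String × List String) → List (String × List String)
  | 0, states => states
  | fuel + 1, states =>
    if ((states.headD ("", [])).2).isEmpty then states
    else altLoop fuel (altStep states)

def rec_alt (a : List String) : Option (List String) :=
  if a = [] then none
  else some ((altLoop a.length [("", a)]).map Prod.fst)

-- ===== PRECONDITION & SPEC =====
def Spec_rec (a : List String) (out : Option (List String)) : Prop := out = rec_alt a
instance (a : List String) (out : Option (List String)) : Decidable (Spec_rec a out) := by unfold Spec_rec; infer_instance

-- ===== CLAIM (what is proved, stated in full; the proofs are below) =====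
def Claim_equal_rec : Prop := ∀ (a : List String), Dom_rec a → Spec_rec a (rec a)

-- ===== LEMMAS AND PROOFS =====

-- canonical value: all permutation-concatenations of rem, by fuel n = rem.length
def G : Nat → List String → List String
  | 0, _ => [""]
  | n + 1, rem => (List.range rem.length).flatMap
      (fun i => (G n (rem.take i ++ rem.drop (i + 1))).map
        (fun s => (rem.getD i "") ++ s))

theorem rec_eq_G : ∀ (n : Nat) (a : List String), a.length = n → a ≠ [] →
    rec a = some (G n a) := by
  intro n
  induction n with
  | zero => intro a h h'; exact absurd (List.length_eq_zero_iff.mp h) h'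
  | succ n ih =>
    intro a h h'
    by_cases h1 : a.length = 1
    · -- singleton: rec a = some a, G 1 a = [a[0] ++ ""] = a
      obtain ⟨x, hx⟩ : ∃ x, a = [x] := by
        match a, h1 with
        | [x], _ => exact ⟨x, rfl⟩
      have hn : n = 0 := by omega
      subst hx hn
      simp [rec, G, List.range_succ]
    · rw [rec]
      have h2 : a.length ≠ 0 := by omega
      rw [if_neg h2, if_neg h1]
      congr 1
      rw [List.foldl_attach (l := List.range a.length)
        (f := fun p (i : Nat) =>
          p ++ ((rec (a.take i ++ a.drop (i + 1))).getD []).map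
            (fun j => (a.getD i "") ++ j))]
      rw [PySem.List.foldl_append_eq_flatMap]
      rw [List.nil_append]
      conv_rhs => rw [G]
      apply List.flatMap_congr
      intro i hi
      have hilt : i < a.length := List.mem_range.mp hi
      have hlen : (a.take i ++ a.drop (i + 1)).length = n := by
        simp only [List.length_append, List.length_take, List.length_drop]; omega
      have hne : (a.take i ++ a.drop (i + 1)) ≠ [] := by
        intro hc
        have := congrArg List.length hc
        simp [hlen] at this; omega
      rw [ih _ hlen hne]
      rfl

theorem altLoop_eq_G : ∀ (n : Nat) (states : List (String × List String)),
    states ≠ [] → (∀ s ∈ states, s.2.length = n) →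
    altLoop n states
      = states.flatMap (fun s => (G n s.2).map (fun t => (s.1 ++ t, ([] : List String)))) := by
  intro n
  induction n with
  | zero =>
    intro states _ hlen
    rw [altLoop]
    have hsing : ∀ s ∈ states,
        (G 0 s.2).map (fun t => (s.1 ++ t, ([] : List String))) = [s] := by
      intro s hs
      have h2 : s.2 = [] := List.length_eq_zero_iff.mp (hlen s hs)
      obtain ⟨p, r⟩ := s
      simp only at h2
      subst h2
      simp [G]
    calc states = states.flatMap (fun s => [s]) := by simp
      _ = _ := (List.flatMap_congr hsing).symm
  | succ n ih =>
    intro states hne hlen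
    obtain ⟨s0, t0, rfl⟩ := List.exists_cons_of_ne_nil hne
    rw [altLoop]
    have h0 : s0.2.length = n + 1 := hlen s0 (by simp)
    have hc : ¬ (((s0 :: t0).headD ("", [])).2).isEmpty = true := by
      simp only [List.headD_cons, List.isEmpty_iff]
      intro hc; rw [hc] at h0; simp at h0
    rw [if_neg hc]
    have hstep_len : ∀ s ∈ altStep (s0 :: t0), s.2.length = n := by
      intro s hs
      simp only [altStep, List.mem_flatMap, List.mem_map, List.mem_range] at hs
      obtain ⟨u, hu, i, hi, rfl⟩ := hs
      have := hlen u hu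
      simp only [List.length_append, List.length_take, List.length_drop]
      omega
    have hstep_ne : altStep (s0 :: t0) ≠ [] := by
      simp only [altStep, List.flatMap_cons, ne_eq, List.append_eq_nil_iff,
        List.map_eq_nil_iff, List.range_eq_nil]
      intro hcon
      omega
    rw [ih _ hstep_ne hstep_len]
    rw [altStep, List.flatMap_assoc]
    apply List.flatMap_congr
    intro s hs
    have hsl : s.2.length = n + 1 := hlen s hs
    rw [List.flatMap_map]
    conv_rhs => rw [G]
    rw [List.map_flatMap]
    apply List.flatMap_congr
    intro i _
    simp only [List.map_map]
    apply List.map_congr_left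
    intro t _
    simp [Function.comp, String.append_assoc]

theorem rec_alt_eq_G (a : List String) (h : a ≠ []) :
    rec_alt a = some (G a.length a) := by
  rw [rec_alt, if_neg h]
  rw [altLoop_eq_G a.length [("", a)] (by simp) (by simp)]
  simp [Function.comp_def]

-- ===== VERDICT (by name: the statement is the Claim_ definition above) =====
theorem rec_spec : Claim_equal_rec := by
  intro a _
  unfold Spec_rec
  by_cases h : a = []
  · subst h; simp [rec, rec_alt]
  · rw [rec_eq_G a.length a rfl h, rec_alt_eq_G a h]
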